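-- pv_equiv track=rewrite | github.com/Olszewski-Jakub/Matury | SPOJ/Level 4/LICZBYW - Liczby wyważone.py | checkFactors
-- ===== SOURCE A (Python) =====
-- def divisorsSame(n):
--     # If (n-2)%4 is an integer, then
--     # return true else return false
--     return (n - 2) % 4 == 0;
--
-- def checkFactors(N):
--     if N == 1:
--         return 2
--     czy_wywazona = False
--
--     while not czy_wywazona:
--         N += 1
--         czy_wywazona = divisorsSame(N)
--     return N
-- ===== SOURCE B (Python) =====
-- def checkFactors(N):
--     # Closed form: smallest M > N with M % 4 == 2 (Python's non-negative % for positive divisor).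
--     return N + 1 + (2 - (N + 1)) % 4
-- ===== Notes on version B (the rewrite author's own statement) =====
-- stated objective: simpler
-- what changed: Replaced the increment-until-congruent while loop (and the N==1 special case) with the closed form N + 1 + (2 - (N+1)) % 4, which directly yields the smallest integer > N congruent to 2 mod 4.
import Mathlib
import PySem

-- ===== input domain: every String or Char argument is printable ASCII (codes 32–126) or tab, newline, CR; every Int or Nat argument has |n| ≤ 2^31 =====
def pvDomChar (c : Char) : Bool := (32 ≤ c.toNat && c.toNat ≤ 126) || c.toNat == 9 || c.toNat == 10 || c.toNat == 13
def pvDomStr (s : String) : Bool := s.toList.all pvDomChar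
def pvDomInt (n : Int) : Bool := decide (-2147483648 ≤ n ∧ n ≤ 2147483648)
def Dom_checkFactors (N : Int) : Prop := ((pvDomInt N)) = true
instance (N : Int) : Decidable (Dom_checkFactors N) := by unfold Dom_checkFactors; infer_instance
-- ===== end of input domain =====

-- B replaces A's increment-until-congruent loop with the closed form N+1+((2-(N+1)) mod 4); simpler, same values.
-- ===== PORT A =====
def divisorsSame (n : Int) : Bool := PySem.Int.mod (n - 2) 4 == 0

-- the while loop of A: increment N until divisorsSame N; fuel ((2-(N+1)) % 4).toNat + 1
-- provably suffices (the loop body is unchanged; structural recursion so the kernel can evaluate)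
def checkFactorsLoop : Nat → Int → Int
  | 0, N => N
  | fuel + 1, N =>
    let N' := N + 1
    if divisorsSame N' then N' else checkFactorsLoop fuel N'

def checkFactors (N : Int) : Int :=
  if N == 1 then 2 else checkFactorsLoop (((2 - (N + 1)) % 4).toNat + 1) N

-- ===== PORT B =====
def checkFactors_alt (N : Int) : Int := N + 1 + PySem.Int.mod (2 - (N + 1)) 4

-- ===== PRECONDITION & SPEC =====
def Spec_checkFactors (N : Int) (out : Int) : Prop := out = checkFactors_alt N
instance (N : Int) (out : Int) : Decidable (Spec_checkFactors N out) := by unfold Spec_checkFactors; infer_instance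

-- ===== CLAIM (what is proved, stated in full; the proofs are below) =====
def Claim_equal_checkFactors : Prop := ∀ (N : Int), Dom_checkFactors N → Spec_checkFactors N (checkFactors N)

-- ===== LEMMAS AND PROOFS =====
theorem checkFactorsLoop_closed (fuel : Nat) (N : Int)
    (hf : ((2 - (N + 1)) % 4).toNat < fuel) :
    checkFactorsLoop fuel N = N + 1 + (2 - (N + 1)) % 4 := by
  induction fuel generalizing N with
  | zero => omega
  | succ fuel ih =>
    show (if divisorsSame (N + 1) then N + 1 else checkFactorsLoop fuel (N + 1)) = _
    simp only [divisorsSame, PySem.Int.mod_eq_emod_of_pos (by omega : (0:Int) < 4), beq_iff_eq]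
    split
    · next h => omega
    · next h =>
      rw [ih (N + 1) (by omega)]
      omega

-- ===== VERDICT (by name: the statement is the Claim_ definition above) =====
theorem checkFactors_spec : Claim_equal_checkFactors := by
  intro N _
  unfold Spec_checkFactors checkFactors checkFactors_alt
  rw [PySem.Int.mod_eq_emod_of_pos (by omega : (0:Int) < 4)]
  split
  · next h => simp only [beq_iff_eq] at h; omega
  · exact checkFactorsLoop_closed _ N (by omega)
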